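-- pv_equiv track=rewrite | github.com/thimaianhphan/travel_marvel | backend/services/alternatives_discovery/category_mapping.py | matching_buckets
-- ===== SOURCE A (Python) =====
-- from typing import List
--
-- CATEGORY_EQUIV = {
--     "lake": {"lake", "lagoon", "reservoir", "pond", "fjord", "glacial_lake", "crater_lake"},
--     "waterfall": {"waterfall", "cascade"},
--     "beach": {"beach", "bay", "shore", "coastline"},
--     "viewpoint": {"viewpoint", "peak", "summit", "overlook", "cliff"},
--     "park": {"park", "protected_area", "nature_reserve"},
--     "castle": {"castle", "fortress"},
--     "church": {"church", "cathedral", "basilica", "monastery"},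
--     "museum": {"museum"},
--     "unknown": {"unknown"},
-- }
--
-- def matching_buckets(query_category: str) -> List[str]:
--     q = (query_category or "unknown").lower()
--     allowed = CATEGORY_EQUIV.get(q, {q})
--     buckets: List[str] = []
--     for coarse, members in CATEGORY_EQUIV.items():
--         if coarse in allowed or members.intersection(allowed):
--             buckets.append(coarse)
--     return buckets
-- ===== SOURCE B (Python) =====
-- from typing import List
--
-- CATEGORY_EQUIV = {
--     "lake": {"lake", "lagoon", "reservoir", "pond", "fjord", "glacial_lake", "crater_lake"},
--     "waterfall": {"waterfall", "cascade"},
--     "beach": {"beach", "bay", "shore", "coastline"},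
--     "viewpoint": {"viewpoint", "peak", "summit", "overlook", "cliff"},
--     "park": {"park", "protected_area", "nature_reserve"},
--     "castle": {"castle", "fortress"},
--     "church": {"church", "cathedral", "basilica", "monastery"},
--     "museum": {"museum"},
--     "unknown": {"unknown"},
-- }
--
-- # Reverse index built once: member string -> its coarse bucket (buckets are disjoint).
-- MEMBER_TO_COARSE = {
--     member: coarse
--     for coarse, members in CATEGORY_EQUIV.items()
--     for member in members
-- }
--
-- def matching_buckets(query_category: str) -> List[str]:
--     q = (query_category or "unknown").lower()
--     coarse = MEMBER_TO_COARSE.get(q)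
--     return [] if coarse is None else [coarse]
-- ===== Notes on version B (the rewrite author's own statement) =====
-- stated objective: simpler
-- what changed: Replaces the per-query scan over all buckets (with a set-intersection test per bucket) by a reverse index member->coarse built once, so matching_buckets is a single dict lookup returning [bucket] or [].
import Mathlib
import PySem

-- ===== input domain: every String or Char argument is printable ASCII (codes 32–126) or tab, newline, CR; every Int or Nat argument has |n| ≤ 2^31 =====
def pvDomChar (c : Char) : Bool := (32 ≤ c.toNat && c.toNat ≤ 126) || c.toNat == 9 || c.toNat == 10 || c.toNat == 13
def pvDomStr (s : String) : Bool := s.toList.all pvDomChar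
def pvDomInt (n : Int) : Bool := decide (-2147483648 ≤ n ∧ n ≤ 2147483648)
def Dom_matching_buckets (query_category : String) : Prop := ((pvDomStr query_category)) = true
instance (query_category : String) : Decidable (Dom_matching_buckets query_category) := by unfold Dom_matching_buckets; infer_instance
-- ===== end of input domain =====

-- B replaces A's per-query scan over all buckets by a reverse index member -> coarse bucket
-- built once, so the query is a single lookup (objective: simpler).

-- ===== PORT A =====
def categoryEquiv : PySem.Dict String (PySem.Set String) := PySem.Dict.mk [
  ("lake", PySem.Set.ofList ["lake", "lagoon", "reservoir", "pond", "fjord", "glacial_lake", "crater_lake"]),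
  ("waterfall", PySem.Set.ofList ["waterfall", "cascade"]),
  ("beach", PySem.Set.ofList ["beach", "bay", "shore", "coastline"]),
  ("viewpoint", PySem.Set.ofList ["viewpoint", "peak", "summit", "overlook", "cliff"]),
  ("park", PySem.Set.ofList ["park", "protected_area", "nature_reserve"]),
  ("castle", PySem.Set.ofList ["castle", "fortress"]),
  ("church", PySem.Set.ofList ["church", "cathedral", "basilica", "monastery"]),
  ("museum", PySem.Set.ofList ["museum"]),
  ("unknown", PySem.Set.ofList ["unknown"])]

def matching_buckets (query_category : String) : List String :=
  let q := PySem.Str.lower (if query_category = "" then "unknown" else query_category)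
  let allowed := (categoryEquiv.get? q).getD (PySem.Set.ofList [q])
  categoryEquiv.items.foldl (fun buckets p =>
    if PySem.Set.contains allowed p.1 || decide (PySem.Set.inter p.2 allowed ≠ []) then
      buckets ++ [p.1]
    else buckets) []

-- ===== PORT B =====
-- the reverse index MEMBER_TO_COARSE (buckets are pairwise disjoint, so content is order-independent)
def memberToCoarse : PySem.Dict String String := PySem.Dict.mk [
  ("lake", "lake"), ("lagoon", "lake"), ("reservoir", "lake"), ("pond", "lake"),
  ("fjord", "lake"), ("glacial_lake", "lake"), ("crater_lake", "lake"),
  ("waterfall", "waterfall"), ("cascade", "waterfall"),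
  ("beach", "beach"), ("bay", "beach"), ("shore", "beach"), ("coastline", "beach"),
  ("viewpoint", "viewpoint"), ("peak", "viewpoint"), ("summit", "viewpoint"),
  ("overlook", "viewpoint"), ("cliff", "viewpoint"),
  ("park", "park"), ("protected_area", "park"), ("nature_reserve", "park"),
  ("castle", "castle"), ("fortress", "castle"),
  ("church", "church"), ("cathedral", "church"), ("basilica", "church"), ("monastery", "church"),
  ("museum", "museum"),
  ("unknown", "unknown")]

def matching_buckets_alt (query_category : String) : List String :=
  let q := PySem.Str.lower (if query_category = "" then "unknown" else query_category)
  match memberToCoarse.get? q with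
  | some coarse => [coarse]
  | none => []

-- ===== PRECONDITION & SPEC =====
def Spec_matching_buckets (query_category : String) (out : List String) : Prop := out = matching_buckets_alt query_category
instance (query_category : String) (out : List String) : Decidable (Spec_matching_buckets query_category out) := by unfold Spec_matching_buckets; infer_instance

-- ===== CLAIM (what is proved, stated in full; the proofs are below) =====
def Claim_equal_matching_buckets : Prop := ∀ (query_category : String), Dom_matching_buckets query_category → Spec_matching_buckets query_category (matching_buckets query_category)

-- ===== LEMMAS AND PROOFS =====

-- all member strings (= the keys of the reverse index)
def allMembers : List String := memberToCoarse.items.map (·.1)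

-- the core fact, for an arbitrary normalized query q
theorem core (q : String) :
    (categoryEquiv.items.foldl (fun buckets p =>
      if PySem.Set.contains ((categoryEquiv.get? q).getD (PySem.Set.ofList [q])) p.1
          || decide (PySem.Set.inter p.2 ((categoryEquiv.get? q).getD (PySem.Set.ofList [q])) ≠ []) then
        buckets ++ [p.1]
      else buckets) []) =
    (match memberToCoarse.get? q with
      | some coarse => [coarse]
      | none => []) := by
  by_cases hm : q ∈ allMembers
  · simp only [allMembers, memberToCoarse, List.map, List.mem_cons,
      List.not_mem_nil, or_false] at hm
    rcases hm with h|h|h|h|h|h|h|h|h|h|h|h|h|h|h|h|h|h|h|h|h|h|h|h|h|h|h|h|h <;> subst h <;> decide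
  · simp only [allMembers, memberToCoarse, List.map, List.mem_cons,
      List.not_mem_nil, or_false, not_or] at hm
    obtain ⟨h1,h2,h3,h4,h5,h6,h7,h8,h9,h10,h11,h12,h13,h14,h15,h16,h17,h18,h19,h20,h21,h22,h23,h24,h25,h26,h27,h28,h29⟩ := hm
    simp [categoryEquiv, memberToCoarse, PySem.Dict.get?, PySem.Set.ofList,
      PySem.Set.inter, PySem.Set.contains, PySem.Set.add, List.foldl,
      h1,h2,h3,h4,h5,h6,h7,h8,h9,h10,h11,h12,h13,h14,h15,h16,h17,h18,h19,h20,h21,h22,h23,h24,h25,h26,h27,h28,h29,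
      Ne.symm h1, Ne.symm h2, Ne.symm h3, Ne.symm h4, Ne.symm h5, Ne.symm h6, Ne.symm h7,
      Ne.symm h8, Ne.symm h9, Ne.symm h10, Ne.symm h11, Ne.symm h12, Ne.symm h13, Ne.symm h14,
      Ne.symm h15, Ne.symm h16, Ne.symm h17, Ne.symm h18, Ne.symm h19, Ne.symm h20, Ne.symm h21,
      Ne.symm h22, Ne.symm h23, Ne.symm h24, Ne.symm h25, Ne.symm h26, Ne.symm h27, Ne.symm h28,
      Ne.symm h29]

-- ===== VERDICT (by name: the statement is the Claim_ definition above) =====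
theorem matching_buckets_spec : Claim_equal_matching_buckets := by
  intro query_category _
  unfold Spec_matching_buckets matching_buckets matching_buckets_alt
  exact core _
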